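-- pv_equiv track=rewrite | github.com/Shounak-Ghosh/cs3224-os | hw10/lab10_a.py | find_victim
-- ===== SOURCE A (Python) =====
-- def find_victim(page_table):
--     """Find a victim page to replace using the second-chance algorithm."""
--     while True:
--         for page, entry in page_table.items():
--             if entry['valid'] and entry['reference'] == 0:
--                 return page
--             elif entry['valid']:
--                 entry['reference'] = 0  # Reset the reference bit
--     return None  # Shouldn't reach here
-- ===== SOURCE B (Python) =====
-- def find_victim(page_table):
--     """Find a victim page to replace using the second-chance algorithm.
--
--     Single sweep: return the first valid page whose reference bit is 0;
--     otherwise clear reference bits as we go and remember the first valid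
--     page as the fallback victim, returned after the sweep.
--     """
--     fallback = None
--     for page, entry in page_table.items():
--         if entry['valid']:
--             if entry['reference'] == 0:
--                 return page
--             entry['reference'] = 0
--             if fallback is None:
--                 fallback = page
--     return fallback
-- ===== Notes on version B (the rewrite author's own statement) =====
-- stated objective: alternative
-- what changed: Replaces A's two sweeps (an unbounded while-loop re-scanning the table after resetting reference bits) with a single sweep that remembers the first valid page as a fallback and returns it after the sweep; Pre_ excludes exactly the inputs where A raises KeyError on a missing 'valid'/'reference' key or loops forever because no page is valid.
import Mathlib
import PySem

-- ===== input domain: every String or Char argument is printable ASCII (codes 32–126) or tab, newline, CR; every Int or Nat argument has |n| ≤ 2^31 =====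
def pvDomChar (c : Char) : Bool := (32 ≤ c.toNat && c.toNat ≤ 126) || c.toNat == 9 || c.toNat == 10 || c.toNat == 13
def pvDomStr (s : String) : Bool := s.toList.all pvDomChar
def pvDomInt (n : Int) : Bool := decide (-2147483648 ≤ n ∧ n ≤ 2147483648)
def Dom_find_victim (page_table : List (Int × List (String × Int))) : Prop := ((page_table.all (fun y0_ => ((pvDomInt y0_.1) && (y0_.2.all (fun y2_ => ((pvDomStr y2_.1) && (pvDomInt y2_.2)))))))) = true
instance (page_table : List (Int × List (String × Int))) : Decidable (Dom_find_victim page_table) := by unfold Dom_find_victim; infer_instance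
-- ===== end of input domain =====

-- B is one sweep with a remembered fallback instead of A's up-to-two sweeps; equivalence is about
-- the RETURN value — both Pythons also reset the same reference bits in place (checked by test, not proved here).

-- the page_table parameter is a Python dict, as is each entry: build them with Dict.ofList
-- (duplicate keys collapse as in Python: first position, last value)
def pvEntry (e : List (String × Int)) (k : String) : Int := (PySem.Dict.ofList e).getD k 0

-- ===== PORT A =====
-- A's `while True` runs at most twice when some page is valid: the first sweep returns the first
-- valid page with reference 0 (resetting reference bits as it goes); if none, by the second sweep
-- every valid page's reference bit is 0, so it returns the first valid page.  With no valid page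
-- Python A loops forever — Pre_find_victim excludes that, and this port returns none there.
def fvSweep1 : List (Int × List (String × Int)) → Option Int
  | [] => none
  | (p, e) :: rest =>
      if pvEntry e "valid" ≠ 0 ∧ pvEntry e "reference" = 0 then some p
      else fvSweep1 rest

def fvSweep2 : List (Int × List (String × Int)) → Option Int
  | [] => none
  | (p, e) :: rest => if pvEntry e "valid" ≠ 0 then some p else fvSweep2 rest

def find_victim (page_table : List (Int × List (String × Int))) : Option Int :=
  match fvSweep1 (PySem.Dict.ofList page_table).items with
  | some p => some p
  | none => fvSweep2 (PySem.Dict.ofList page_table).items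

-- ===== PORT B =====
-- single sweep carrying the fallback (first valid page seen); returns the fallback after the sweep.
def fvGo (fb : Option Int) : List (Int × List (String × Int)) → Option Int
  | [] => fb
  | (p, e) :: rest =>
      if pvEntry e "valid" ≠ 0 then
        if pvEntry e "reference" = 0 then some p
        else fvGo (match fb with | none => some p | some q => some q) rest
      else fvGo fb rest

def find_victim_alt (page_table : List (Int × List (String × Int))) : Option Int :=
  fvGo none (PySem.Dict.ofList page_table).items

-- ===== PRECONDITION & SPEC =====
-- entry has every key A reads from it: 'valid', and 'reference' when valid is truthy
def fvKeysOk (e : List (String × Int)) : Bool :=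
  (PySem.Dict.ofList e).contains "valid" &&
    (pvEntry e "valid" == 0 || (PySem.Dict.ofList e).contains "reference")

-- entry at which A's first sweep returns: valid with reference bit 0 (both keys present)
def fvVictim1 (e : List (String × Int)) : Bool :=
  (PySem.Dict.ofList e).contains "valid" && !(pvEntry e "valid" == 0) &&
    (PySem.Dict.ofList e).contains "reference" && pvEntry e "reference" == 0

-- Pre_ is exactly the inputs on which Python A returns: either the first sweep reaches a valid
-- page with reference 0 and every entry before it has the keys A reads (no KeyError on the way),
-- or every entry has its keys and some page is valid (A returns on its second sweep).  Excluded
-- are exactly the inputs where A raises KeyError or (no valid page) loops forever.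
def Pre_find_victim (page_table : List (Int × List (String × Int))) : Prop :=
  ((∃ q ∈ (PySem.Dict.ofList page_table).items, fvVictim1 q.2 = true) ∧
     ∀ q ∈ (PySem.Dict.ofList page_table).items.takeWhile (fun q => !fvVictim1 q.2),
       fvKeysOk q.2 = true) ∨
  ((∀ q ∈ (PySem.Dict.ofList page_table).items, fvKeysOk q.2 = true) ∧
     ∃ q ∈ (PySem.Dict.ofList page_table).items, pvEntry q.2 "valid" ≠ 0)
instance (page_table : List (Int × List (String × Int))) : Decidable (Pre_find_victim page_table) := by
  unfold Pre_find_victim; infer_instance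

def pvWitness_find_victim : (List (Int × List (String × Int))) :=
  [(0, [("valid", 1), ("reference", 0)])]

def Spec_find_victim (page_table : List (Int × List (String × Int))) (out : Option Int) : Prop := out = find_victim_alt page_table
instance (page_table : List (Int × List (String × Int))) (out : Option Int) : Decidable (Spec_find_victim page_table out) := by unfold Spec_find_victim; infer_instance

-- ===== CLAIM (what is proved, stated in full; the proofs are below) =====
def Claim_equal_find_victim : Prop := ∀ (page_table : List (Int × List (String × Int))), Dom_find_victim page_table → Pre_find_victim page_table → Spec_find_victim page_table (find_victim page_table)

-- ===== LEMMAS AND PROOFS =====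

-- loop invariant of B's sweep: it returns the first valid-and-reference-0 page if any, else the
-- incoming fallback if set, else the first valid page (A's second sweep).
theorem fvGo_eq (l : List (Int × List (String × Int))) : ∀ fb : Option Int,
    fvGo fb l = match fvSweep1 l with
      | some p => some p
      | none => match fb with
        | some q => some q
        | none => fvSweep2 l := by
  induction l with
  | nil => intro fb; cases fb <;> rfl
  | cons hd tl ih =>
    intro fb
    obtain ⟨p, e⟩ := hd
    by_cases hv : pvEntry e "valid" ≠ 0
    · by_cases hr : pvEntry e "reference" = 0
      · simp [fvGo, fvSweep1, hv, hr]
      · have h1 : fvSweep1 ((p, e) :: tl) = fvSweep1 tl := by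
          simp [fvSweep1, hr]
        have h2 : fvSweep2 ((p, e) :: tl) = some p := by
          simp [fvSweep2, hv]
        rw [h1, h2]
        cases fb with
        | none =>
          simp only [fvGo, if_pos hv, if_neg hr]
          rw [ih (some p)]
        | some q =>
          simp only [fvGo, if_pos hv, if_neg hr]
          rw [ih (some q)]
    · have h1 : fvSweep1 ((p, e) :: tl) = fvSweep1 tl := by
        simp [fvSweep1, hv]
      have h2 : fvSweep2 ((p, e) :: tl) = fvSweep2 tl := by
        simp [fvSweep2, hv]
      simp only [fvGo, if_neg hv]
      rw [ih fb, h1, h2]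

-- ===== VERDICT (by name: the statement is the Claim_ definition above) =====
theorem find_victim_spec : Claim_equal_find_victim := by
  intro pt _ _
  unfold Spec_find_victim find_victim find_victim_alt
  rw [fvGo_eq (PySem.Dict.ofList pt).items none]
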